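-- pv_equiv track=rewrite | github.com/adityarama1210/Skripsi | Proses Disambiguation Pages/page_to_object.py | ugly_title_taker
-- ===== SOURCE A (Python) =====
-- def ugly_title_taker(the_line):
-- 	title = ''
-- 	start = False
-- 	for i in range(len(the_line)):
-- 		index = len(the_line)-i-1
-- 		if(the_line[index] == '"' and start):
-- 			return title
-- 		elif(the_line[index] == '"'):
-- 			title = the_line[index] + title
-- 			start = True
-- 		else:
-- 			title = the_line[index] + title
-- ===== SOURCE B (Python) =====
-- def ugly_title_taker(the_line):
--     j = the_line.rfind('"')
--     if j == -1:
--         return None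
--     i = the_line.rfind('"', 0, j)
--     if i == -1:
--         return None
--     return the_line[i + 1:]
-- ===== Notes on version B (the rewrite author's own statement) =====
-- stated objective: faster
-- what changed: Replaced the explicit backward character-by-character scan that rebuilds the title by repeated string prepending with two str.rfind calls locating the last and second-to-last quote and a single slice.
import Mathlib
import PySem

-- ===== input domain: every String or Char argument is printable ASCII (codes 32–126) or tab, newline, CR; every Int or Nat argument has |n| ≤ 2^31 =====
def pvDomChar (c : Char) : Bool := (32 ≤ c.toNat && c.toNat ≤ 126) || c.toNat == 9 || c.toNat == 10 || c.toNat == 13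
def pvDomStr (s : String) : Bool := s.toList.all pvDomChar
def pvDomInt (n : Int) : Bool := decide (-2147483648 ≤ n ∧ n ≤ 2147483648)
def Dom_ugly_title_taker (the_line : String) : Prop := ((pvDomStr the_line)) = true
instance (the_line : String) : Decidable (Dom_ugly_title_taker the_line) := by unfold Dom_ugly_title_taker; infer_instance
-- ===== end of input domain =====

-- B replaces A's backward character scan (which rebuilds the accumulator string by repeated
-- prepending, quadratic) with two str.rfind calls and one slice; objective: faster.


-- ===== PORT A =====
-- A iterates i = 0 .. n-1 reading index = n-1-i, i.e. the char positions n-1 down to 0.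
-- We recurse on k = number of positions still unread; the position read is k-1.
-- the_line[index] is always in range here, so the impossible out-of-range branch returns none.
def uglyGo (cs : List Char) (k : Nat) (title : List Char) (start : Bool) : Option (List Char) :=
  match k with
  | 0 => none                      -- loop ended without a second quote: Python falls off, returns None
  | Nat.succ j =>
    match cs[j]? with
    | none => none                 -- unreachable: j < cs.length on every call
    | some c =>
      if c = '"' ∧ start then some title
      else if c = '"' then uglyGo cs j (c :: title) true
      else uglyGo cs j (c :: title) start

def ugly_title_taker (the_line : String) : Option String :=
  (uglyGo the_line.toList the_line.toList.length [] false).map String.ofList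

-- ===== PORT B =====
def ugly_title_taker_alt (the_line : String) : Option String :=
  let j := PySem.Str.rfind the_line "\""
  if j = -1 then none
  else
    let i := PySem.Str.rfindFrom the_line "\"" 0 (some j)
    if i = -1 then none
    else some (PySem.Str.slice the_line (some (i + 1)) none)

-- ===== PRECONDITION & SPEC =====
def Spec_ugly_title_taker (the_line : String) (out : Option String) : Prop := out = ugly_title_taker_alt the_line
instance (the_line : String) (out : Option String) : Decidable (Spec_ugly_title_taker the_line out) := by unfold Spec_ugly_title_taker; infer_instance

-- ===== CLAIM (what is proved, stated in full; the proofs are below) =====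
def Claim_equal_ugly_title_taker : Prop := ∀ (the_line : String), Dom_ugly_title_taker the_line → Spec_ugly_title_taker the_line (ugly_title_taker the_line)

-- ===== LEMMAS AND PROOFS =====

-- ['"'] is a prefix of cs.drop m  iff  cs[m]? = '"'
theorem quote_prefix_iff (cs : List Char) (m : Nat) :
    (['"'].isPrefixOf (cs.drop m)) = true ↔ cs[m]? = some '"' := by
  rw [List.isPrefixOf_iff_prefix]
  constructor
  · rintro ⟨t, ht⟩
    have h0 : (cs.drop m)[0]? = some '"' := by rw [← ht]; rfl
    simpa [List.getElem?_drop] using h0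
  · intro h
    have hm : m < cs.length := by
      by_contra hge
      rw [List.getElem?_eq_none_iff.mpr (by omega)] at h
      simp at h
    rw [List.drop_eq_getElem_cons hm]
    have hv : cs[m] = '"' := by
      rw [List.getElem?_eq_getElem hm] at h
      injection h
    exact hv ▸ ⟨_, rfl⟩

-- negation form used everywhere below
theorem quote_prefix_false (cs : List Char) (m : Nat) (hm : m < cs.length) (hc : cs[m] ≠ '"') :
    (['"'].isPrefixOf (cs.drop m)) = false := by
  rcases Bool.eq_false_or_eq_true (['"'].isPrefixOf (cs.drop m)) with hb | hb
  · exfalso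
    have h := (quote_prefix_iff cs m).mp hb
    rw [List.getElem?_eq_getElem hm] at h
    exact hc (by injection h)
  · exact hb

theorem quote_prefix_true (cs : List Char) (m : Nat) (hm : m < cs.length) (hc : cs[m] = '"') :
    (['"'].isPrefixOf (cs.drop m)) = true :=
  (quote_prefix_iff cs m).mpr (by rw [List.getElem?_eq_getElem hm, hc])

theorem go_zero (cs : List Char) (q : List Char) :
    PySem.Chars.rfind.go cs q 0 = if q.isPrefixOf cs then 0 else -1 := rfl

theorem go_succ (cs : List Char) (q : List Char) (j : Nat) :
    PySem.Chars.rfind.go cs q (j + 1) =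
      if q.isPrefixOf (cs.drop (j + 1)) then ((j : Int) + 1) else PySem.Chars.rfind.go cs q j := by
  rfl

-- result bounds
theorem go_bounds (cs q : List Char) (j : Nat) (h : PySem.Chars.rfind.go cs q j ≠ -1) :
    0 ≤ PySem.Chars.rfind.go cs q j ∧ PySem.Chars.rfind.go cs q j ≤ (j : Int) := by
  induction j with
  | zero =>
    rw [go_zero] at h ⊢
    split at h
    · split <;> simp_all
    · simp_all
  | succ j ih =>
    rw [go_succ] at h ⊢
    split at h
    · split <;> constructor <;> simp_all <;> omega
    · rename_i hp
      have hb := ih h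
      rw [if_neg hp]
      exact ⟨hb.1, by omega⟩

-- the found position carries a quote
theorem go_mem (cs : List Char) (j : Nat) (h : PySem.Chars.rfind.go cs ['"'] j ≠ -1) :
    cs[(PySem.Chars.rfind.go cs ['"'] j).toNat]? = some '"' := by
  induction j with
  | zero =>
    rw [go_zero] at h ⊢
    split at h <;> rename_i hp
    · rw [if_pos hp]
      simpa using (quote_prefix_iff cs 0).mp (by simpa using hp)
    · simp at h
  | succ j ih =>
    rw [go_succ] at h ⊢
    split at h <;> rename_i hp
    · rw [if_pos hp]
      simpa using (quote_prefix_iff cs (j + 1)).mp hp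
    · rw [if_neg hp]
      exact ih h

-- go only looks at drops up to j
theorem go_ext (q : List Char) (j : Nat) (cs ds : List Char)
    (h : ∀ i ≤ j, q.isPrefixOf (cs.drop i) = q.isPrefixOf (ds.drop i)) :
    PySem.Chars.rfind.go cs q j = PySem.Chars.rfind.go ds q j := by
  induction j with
  | zero =>
    rw [go_zero, go_zero]
    have h0 := h 0 (by omega)
    simp only [List.drop_zero] at h0
    rw [h0]
  | succ j ih =>
    rw [go_succ, go_succ, h (j + 1) (by omega), ih (fun i hi => h i (by omega))]

-- scanning a take: go on (cs.take (m+1)) from m+1 equals go on cs from m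
theorem go_take (cs : List Char) (m : Nat) :
    PySem.Chars.rfind.go (cs.take (m + 1)) ['"'] (m + 1) = PySem.Chars.rfind.go cs ['"'] m := by
  rw [go_succ]
  have hdrop : (cs.take (m + 1)).drop (m + 1) = [] := by
    simp [List.drop_eq_nil_iff]
  rw [hdrop, show (['"'].isPrefixOf ([] : List Char)) = false from rfl]
  simp only [Bool.false_eq_true, if_false]
  apply go_ext
  intro i hi
  have hel : (cs.take (m + 1))[i]? = cs[i]? := by
    rw [List.getElem?_take, if_pos (by omega)]
  rcases Bool.eq_false_or_eq_true (['"'].isPrefixOf (cs.drop i)) with hb | hb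
  · have h1 := (quote_prefix_iff cs i).mp hb
    rw [hb, (quote_prefix_iff (cs.take (m + 1)) i).mpr (hel ▸ h1)]
  · rcases Bool.eq_false_or_eq_true (['"'].isPrefixOf ((cs.take (m + 1)).drop i)) with hc | hc
    · exfalso
      have h1 := (quote_prefix_iff (cs.take (m + 1)) i).mp hc
      rw [hel] at h1
      rw [(quote_prefix_iff cs i).mpr h1] at hb
      exact Bool.noConfusion hb
    · rw [hb, hc]

-- top scan: at j = cs.length the first check always fails
theorem go_top (cs : List Char) (n : Nat) (hn : n + 1 = cs.length) :
    PySem.Chars.rfind.go cs ['"'] (n + 1) = PySem.Chars.rfind.go cs ['"'] n := by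
  rw [go_succ]
  have : cs.drop (n + 1) = [] := by simp [List.drop_eq_nil_iff, hn.symm.le]
  rw [this]
  rfl

-- drop of a take extended by one element
theorem drop_take_succ (cs : List Char) (r m : Nat) (hr : r ≤ m) (hm : m < cs.length) :
    (cs.take (m + 1)).drop r = (cs.take m).drop r ++ [cs[m]] := by
  rw [List.take_add_one, List.getElem?_eq_getElem hm]
  simp only [Option.toList_some]
  rw [List.drop_append_of_le_length (by simp; omega)]

-- one step of A's loop when the index is in range
theorem uglyGo_succ (cs : List Char) (k : Nat) (title : List Char) (start : Bool) (h : k < cs.length) :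
    uglyGo cs (k + 1) title start =
      (if cs[k] = '"' ∧ start then some title
       else if cs[k] = '"' then uglyGo cs k (cs[k] :: title) true
       else uglyGo cs k (cs[k] :: title) start) := by
  conv_lhs => rw [uglyGo]
  rw [List.getElem?_eq_getElem h]

-- Phase 2 of A's loop (start = true): collect chars until the next quote below position m
theorem uglyGo_true (cs : List Char) (m : Nat) (hm : m + 1 ≤ cs.length) (title : List Char) :
    uglyGo cs (m + 1) title true =
      (if PySem.Chars.rfind.go cs ['"'] m = -1 then none
       else some ((cs.take (m + 1)).drop ((PySem.Chars.rfind.go cs ['"'] m).toNat + 1) ++ title)) := by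
  induction m generalizing title with
  | zero =>
    have h0 : 0 < cs.length := by omega
    rw [uglyGo_succ cs _ title _ h0, go_zero]
    by_cases hc : cs[0] = '"'
    · have hp := quote_prefix_true cs 0 h0 hc
      simp only [List.drop_zero] at hp
      rw [hp]
      simp [hc, List.drop_eq_nil_iff]
    · have hp := quote_prefix_false cs 0 h0 hc
      simp only [List.drop_zero] at hp
      rw [hp]
      simp [hc, uglyGo]
  | succ m ih =>
    have hm1 : m + 1 < cs.length := by omega
    rw [uglyGo_succ cs _ title _ hm1, go_succ]
    by_cases hc : cs[m + 1] = '"'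
    · rw [quote_prefix_true cs (m + 1) hm1 hc]
      have hne : ((m : Int) + 1) ≠ -1 := by omega
      simp only [hc, true_and, if_true, if_neg hne]
      rw [show ((m : Int) + 1).toNat = m + 1 by omega]
      simp [List.drop_eq_nil_iff]
    · rw [quote_prefix_false cs (m + 1) hm1 hc]
      simp only [Bool.false_eq_true, if_false, hc, false_and, and_true]
      rw [ih (by omega)]
      split
      · rfl
      · rename_i hne
        congr 1
        have hb := go_bounds cs ['"'] m hne
        rw [drop_take_succ cs ((PySem.Chars.rfind.go cs ['"'] m).toNat + 1) (m + 1) (by omega) hm1]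
        simp

-- Phase 1 of A's loop (start = false): scan down to the rightmost quote, then phase 2
theorem uglyGo_false (cs : List Char) (j : Nat) (hj : j + 1 ≤ cs.length) (title : List Char) :
    uglyGo cs (j + 1) title false =
      (if PySem.Chars.rfind.go cs ['"'] j = -1 then none
       else uglyGo cs (PySem.Chars.rfind.go cs ['"'] j).toNat
              ('"' :: ((cs.take (j + 1)).drop ((PySem.Chars.rfind.go cs ['"'] j).toNat + 1)) ++ title)
              true) := by
  induction j generalizing title with
  | zero =>
    have h0 : 0 < cs.length := by omega
    rw [uglyGo_succ cs _ title _ h0, go_zero]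
    by_cases hc : cs[0] = '"'
    · have hp := quote_prefix_true cs 0 h0 hc
      simp only [List.drop_zero] at hp
      rw [hp]
      simp [hc, List.drop_eq_nil_iff]
    · have hp := quote_prefix_false cs 0 h0 hc
      simp only [List.drop_zero] at hp
      rw [hp]
      simp [hc, uglyGo]
  | succ j ih =>
    have hj1 : j + 1 < cs.length := by omega
    rw [uglyGo_succ cs _ title _ hj1, go_succ]
    by_cases hc : cs[j + 1] = '"'
    · rw [quote_prefix_true cs (j + 1) hj1 hc]
      have hne : ((j : Int) + 1) ≠ -1 := by omega
      simp only [hc, and_false, if_false, if_true, if_neg hne]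
      rw [show ((j : Int) + 1).toNat = j + 1 by omega]
      simp [List.drop_eq_nil_iff]
    · rw [quote_prefix_false cs (j + 1) hj1 hc]
      simp only [Bool.false_eq_true, if_false, hc, false_and, and_false]
      rw [ih (by omega)]
      split
      · rfl
      · rename_i hne
        have hb := go_bounds cs ['"'] j hne
        rw [drop_take_succ cs ((PySem.Chars.rfind.go cs ['"'] j).toNat + 1) (j + 1) (by omega) hj1]
        simp

-- list-level statement of the whole equivalence
theorem main_list (cs : List Char) :
    uglyGo cs cs.length [] false =
      (if PySem.Chars.rfind cs ['"'] = -1 then none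
       else if PySem.Chars.rfindFrom cs ['"'] 0 (some (PySem.Chars.rfind cs ['"'])) = -1 then none
       else some (PySem.Chars.slice cs
         (some (PySem.Chars.rfindFrom cs ['"'] 0 (some (PySem.Chars.rfind cs ['"'])) + 1)) none)) := by
  match hn : cs.length with
  | 0 =>
    have hcs : cs = [] := List.length_eq_zero_iff.mp hn
    subst hcs
    rfl
  | Nat.succ m =>
    have h1 : PySem.Chars.rfind cs ['"'] = PySem.Chars.rfind.go cs ['"'] m := by
      show PySem.Chars.rfind.go cs ['"'] cs.length = _
      rw [hn]
      exact go_top cs m hn.symm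
    rw [Nat.succ_eq_add_one, uglyGo_false cs m (by omega) [], h1]
    have htake : cs.take (m + 1) = cs := List.take_of_length_le (by omega)
    split
    · rfl
    · rename_i hne
      have hb := go_bounds cs ['"'] m hne
      have hmem := go_mem cs m hne
      rw [htake]
      -- the rightmost quote sits at position r.toNat
      match hq : (PySem.Chars.rfind.go cs ['"'] m).toNat with
      | 0 =>
        -- phase 2 starts at 0: no room for a second quote; B's rfind over cs[0:0] is -1 too
        have hr0 : PySem.Chars.rfind.go cs ['"'] m = 0 := by omega
        show (none : Option (List Char)) = _
        rw [hr0]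
        have hdone : PySem.Chars.rfindFrom cs ['"'] 0 (some 0) = -1 := by
          unfold PySem.Chars.rfindFrom
          have h1 : ¬((cs.length : Int) < 0) := by omega
          simp only [h1, if_false, if_neg (lt_irrefl (0 : Int))]
          norm_num
          decide
        rw [hdone]
        rfl
      | Nat.succ q =>
        have hq1 : q + 1 ≤ cs.length := by omega
        have hrq : PySem.Chars.rfind.go cs ['"'] m = ((q : Int) + 1) := by omega
        rw [Nat.succ_eq_add_one, uglyGo_true cs q hq1]
        -- B's inner rfindFrom reduces to go over the prefix before the rightmost quote
        have hfrom : PySem.Chars.rfindFrom cs ['"'] 0 (some (PySem.Chars.rfind.go cs ['"'] m)) =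
            (if PySem.Chars.rfind.go cs ['"'] q = -1 then -1 else PySem.Chars.rfind.go cs ['"'] q) := by
          rw [hrq]
          unfold PySem.Chars.rfindFrom
          have h1 : ¬((cs.length : Int) < (q : Int) + 1) := by omega
          have h2 : ¬(((q : Int) + 1) < 0) := by omega
          have h3 : ¬(((q : Int) + 1) < (0 : Int)) := h2
          simp only [h1, if_false, h2, if_neg h2]
          simp only [if_neg (lt_irrefl (0 : Int))]
          have hdrop0 : List.drop (0 : Int).toNat (List.take ((q : Int) + 1).toNat cs) = cs.take (q + 1) := by
            norm_num
          rw [hdrop0]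
          have hlen : PySem.Chars.rfind (cs.take (q + 1)) ['"'] = PySem.Chars.rfind.go cs ['"'] q := by
            show PySem.Chars.rfind.go (cs.take (q + 1)) ['"'] (cs.take (q + 1)).length = _
            rw [List.length_take_of_le hq1]
            exact go_take cs q
          rw [hlen, if_neg h2]
          split
          · rfl
          · omega
        rw [hfrom]
        split
        · rename_i hneg2
          simp
        · rename_i hne2
          have hb2 := go_bounds cs ['"'] q hne2
          have hq2 : q + 1 < cs.length := by omega
          have hcq : cs[q + 1] = '"' := by
            rw [hq] at hmem
            rw [List.getElem?_eq_getElem hq2] at hmem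
            injection hmem
          have hslice : PySem.Chars.slice cs (some (PySem.Chars.rfind.go cs ['"'] q + 1)) none =
              cs.drop ((PySem.Chars.rfind.go cs ['"'] q).toNat + 1) := by
            rw [PySem.Chars.slice_eq_listSlice,
              PySem.List.slice_from cs (by omega : (0:Int) ≤ PySem.Chars.rfind.go cs ['"'] q + 1)]
            congr 1
            omega
          rw [hslice]
          congr 1
          -- list equality: drop past the second quote equals prefix-part ++ quote ++ tail
          have hr2 : (PySem.Chars.rfind.go cs ['"'] q).toNat + 1 ≤ q + 1 := by omega
          set r2n := (PySem.Chars.rfind.go cs ['"'] q).toNat with hr2def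
          conv_rhs => rw [← List.take_append_drop (q + 1) cs]
          rw [List.drop_append_of_le_length (by simp; omega),
            List.drop_eq_getElem_cons hq2, hcq]
          simp

-- ===== VERDICT (by name: the statement is the Claim_ definition above) =====
theorem ugly_title_taker_spec : Claim_equal_ugly_title_taker := by
  intro s _
  unfold Spec_ugly_title_taker ugly_title_taker ugly_title_taker_alt
  dsimp only
  rw [main_list s.toList,
    show PySem.Str.rfind s "\"" = PySem.Chars.rfind s.toList ['"'] from rfl,
    show ∀ x, PySem.Str.rfindFrom s "\"" 0 (some x) = PySem.Chars.rfindFrom s.toList ['"'] 0 (some x) from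
      fun _ => rfl]
  split
  · rfl
  · split
    · rfl
    · rfl
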